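-- pv_equiv track=rewrite | github.com/recyalcin/etsy-variant-engine | engine/core.py | summarize_db_plan
-- ===== SOURCE A (Python) =====
-- def summarize_db_plan(actions):
--     by_table = {}
--
--     def uniq_exists(lst):
--         seen = set()
--         out = []
--         for r in lst:
--             key = (
--                 r.get("table"),
--                 r.get("code"),
--                 r.get("desc"),
--                 r.get("desc2"),
--                 r.get("match"),
--             )
--             if key in seen:
--                 continue
--             seen.add(key)
--             out.append(r)
--         return out
--
--     for a in actions:
--         table = a.get("table")
--         if not table:
--             continue
--
--         if table not in by_table:
--             by_table[table] = {
--                 "exists": [],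
--                 "missing": [],
--                 "updates": [],
--             }
--
--         act = a.get("action")
--
--         if act == "EXISTS":
--             by_table[table]["exists"].append(a)
--
--         elif act == "WOULD_INSERT":
--             by_table[table]["missing"].append(a)
--
--         elif act == "WOULD_UPDATE":
--             by_table[table]["updates"].append(a)
--
--     # UNIQUE FILTER only for exists
--     for table in by_table:
--         by_table[table]["exists"] = uniq_exists(by_table[table]["exists"])
--
--     return by_table
-- ===== SOURCE B (Python) =====
-- def summarize_db_plan(actions):
--     by_table = {}
--     seen_by_table = {}
--
--     for a in actions:
--         table = a.get("table")
--         if not table: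
--             continue
--
--         bucket = by_table.setdefault(
--             table, {"exists": [], "missing": [], "updates": []}
--         )
--         act = a.get("action")
--
--         if act == "EXISTS":
--             key = (
--                 a.get("table"),
--                 a.get("code"),
--                 a.get("desc"),
--                 a.get("desc2"),
--                 a.get("match"),
--             )
--             seen = seen_by_table.setdefault(table, set())
--             if key not in seen:
--                 seen.add(key)
--                 bucket["exists"].append(a)
--
--         elif act == "WOULD_INSERT":
--             bucket["missing"].append(a)
--
--         elif act == "WOULD_UPDATE":
--             bucket["updates"].append(a)
--
--     return by_table
-- ===== Notes on version B (the rewrite author's own statement) =====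
-- stated objective: alternative
-- what changed: Replaces A's build-then-filter structure (collect all EXISTS rows, then a second pass re-walking every table running uniq_exists) with a single pass that keeps a per-table set of seen 5-field keys and appends an EXISTS row only if its key is new, so the trailing filtering pass disappears.
import Mathlib
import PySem

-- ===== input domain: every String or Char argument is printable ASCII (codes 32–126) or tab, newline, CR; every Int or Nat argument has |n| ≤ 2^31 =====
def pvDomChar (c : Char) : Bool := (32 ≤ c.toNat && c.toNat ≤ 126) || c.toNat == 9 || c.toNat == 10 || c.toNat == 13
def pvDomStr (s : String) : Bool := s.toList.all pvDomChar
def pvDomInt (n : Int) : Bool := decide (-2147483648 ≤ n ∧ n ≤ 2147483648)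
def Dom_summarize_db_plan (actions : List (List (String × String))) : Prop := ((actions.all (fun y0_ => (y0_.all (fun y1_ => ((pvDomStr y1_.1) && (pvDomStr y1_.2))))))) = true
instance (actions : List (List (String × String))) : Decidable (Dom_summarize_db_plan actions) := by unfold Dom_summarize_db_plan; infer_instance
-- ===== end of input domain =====

-- B replaces A's build-then-filter structure by a single pass that dedupes EXISTS
-- rows on the fly with per-table seen-key sets (objective: alternative, same cost).

-- ===== PORT A =====
-- an action dict; a.get(k) = first match in the association list
def pvGetS (a : List (String × String)) (k : String) : Option String :=
  (PySem.Dict.mk a).get? k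

-- the five-field dedup key of uniq_exists
def pvKeyOf (r : List (String × String)) :
    Option String × Option String × Option String × Option String × Option String :=
  (pvGetS r "table", pvGetS r "code", pvGetS r "desc", pvGetS r "desc2", pvGetS r "match")

-- {"exists": [], "missing": [], "updates": []}
def pvInit : PySem.Dict String (List (List (String × String))) :=
  PySem.Dict.mk [("exists", []), ("missing", []), ("updates", [])]

-- one step of uniq_exists' loop (state = (seen, out))
def pvUniqStep
    (st : PySem.Set (Option String × Option String × Option String × Option String × Option String)
          × List (List (String × String)))
    (r : List (String × String)) :
    PySem.Set (Option String × Option String × Option String × Option String × Option String)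
      × List (List (String × String)) :=
  let key := pvKeyOf r
  if st.1.contains key then st else (st.1.add key, st.2 ++ [r])

def pvUniqExists (lst : List (List (String × String))) : List (List (String × String)) :=
  (lst.foldl pvUniqStep (PySem.Set.empty, [])).2

-- body of A's main loop (by_table[table][...].append ported as modify; the keys are always present)
def pvStepA (d : PySem.Dict String (PySem.Dict String (List (List (String × String)))))
    (a : List (String × String)) :
    PySem.Dict String (PySem.Dict String (List (List (String × String)))) :=
  match pvGetS a "table" with
  | none => d
  | some t =>
    if t = "" then d
    else
      let d1 := if d.contains t then d else d.insert t pvInit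
      let act := pvGetS a "action"
      if act = some "EXISTS" then
        d1.modify t PySem.Dict.empty (fun inner => inner.modify "exists" [] (· ++ [a]))
      else if act = some "WOULD_INSERT" then
        d1.modify t PySem.Dict.empty (fun inner => inner.modify "missing" [] (· ++ [a]))
      else if act = some "WOULD_UPDATE" then
        d1.modify t PySem.Dict.empty (fun inner => inner.modify "updates" [] (· ++ [a]))
      else d1

def summarize_db_plan (actions : List (List (String × String))) :
    List (String × List (String × List (List (String × String)))) :=
  let by_table := actions.foldl pvStepA PySem.Dict.empty
  -- UNIQUE FILTER only for exists (the trailing pass over every table)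
  (by_table.items.map (fun p =>
    (p.1, (p.2.insert "exists" (pvUniqExists (p.2.getD "exists" []))).items)))

-- ===== PORT B =====
-- body of B's single loop (state = (by_table, seen_by_table))
def pvStepB
    (st : PySem.Dict String (PySem.Dict String (List (List (String × String))))
          × PySem.Dict String (PySem.Set (Option String × Option String × Option String × Option String × Option String)))
    (a : List (String × String)) :
    PySem.Dict String (PySem.Dict String (List (List (String × String))))
      × PySem.Dict String (PySem.Set (Option String × Option String × Option String × Option String × Option String)) :=
  match pvGetS a "table" with
  | none => st
  | some t =>
    if t = "" then st
    else
      let bt := st.1.setdefault t pvInit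
      let act := pvGetS a "action"
      if act = some "EXISTS" then
        let key := pvKeyOf a
        let seen1 := st.2.setdefault t PySem.Set.empty
        let s := seen1.getD t PySem.Set.empty
        if s.contains key then (bt, seen1)
        else (bt.modify t PySem.Dict.empty (fun inner => inner.modify "exists" [] (· ++ [a])),
              seen1.insert t (s.add key))
      else if act = some "WOULD_INSERT" then
        (bt.modify t PySem.Dict.empty (fun inner => inner.modify "missing" [] (· ++ [a])), st.2)
      else if act = some "WOULD_UPDATE" then
        (bt.modify t PySem.Dict.empty (fun inner => inner.modify "updates" [] (· ++ [a])), st.2)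
      else (bt, st.2)

def summarize_db_plan_alt (actions : List (List (String × String))) :
    List (String × List (String × List (List (String × String)))) :=
  ((actions.foldl pvStepB (PySem.Dict.empty, PySem.Dict.empty)).1.items.map
    (fun p => (p.1, p.2.items)))

-- ===== PRECONDITION & SPEC =====
def Spec_summarize_db_plan (actions : List (List (String × String))) (out : List (String × List (String × List (List (String × String))))) : Prop := out = summarize_db_plan_alt actions
instance (actions : List (List (String × String))) (out : List (String × List (String × List (List (String × String))))) : Decidable (Spec_summarize_db_plan actions out) := by
  unfold Spec_summarize_db_plan
  -- built step by step: the fully nested DecidableEq is too large for one instance search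
  have h2 : DecidableEq (List (List (String × String))) := instDecidableEqList
  have h3 : DecidableEq (String × List (List (String × String))) := instDecidableEqProd
  have h4 : DecidableEq (List (String × List (List (String × String)))) := instDecidableEqList
  have h5 : DecidableEq (String × List (String × List (List (String × String)))) := instDecidableEqProd
  have h6 : DecidableEq (List (String × List (String × List (List (String × String))))) := instDecidableEqList
  exact h6 out (summarize_db_plan_alt actions)

-- ===== CLAIM (what is proved, stated in full; the proofs are below) =====
def Claim_equal_summarize_db_plan : Prop := ∀ (actions : List (List (String × String))), Dom_summarize_db_plan actions → Spec_summarize_db_plan actions (summarize_db_plan actions)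

-- ===== LEMMAS AND PROOFS =====

-- a three-slot inner dict
def pvMkInner (e m u : List (List (String × String))) :
    PySem.Dict String (List (List (String × String))) :=
  PySem.Dict.mk [("exists", e), ("missing", m), ("updates", u)]

def pvUniqFst (e : List (List (String × String))) :
    PySem.Set (Option String × Option String × Option String × Option String × Option String) :=
  (e.foldl pvUniqStep (PySem.Set.empty, [])).1

def pvUniqSnd (e : List (List (String × String))) : List (List (String × String)) :=
  (e.foldl pvUniqStep (PySem.Set.empty, [])).2

-- the loop invariant tying A's state to B's state
def pvInv (dA dB : PySem.Dict String (PySem.Dict String (List (List (String × String)))))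
    (seen : PySem.Dict String (PySem.Set (Option String × Option String × Option String × Option String × Option String))) : Prop :=
  dB.keys = dA.keys ∧ dA.keys.Nodup ∧
  (∀ t, t ∉ dA.keys → seen.getD t PySem.Set.empty = PySem.Set.empty) ∧
  (∀ t, t ∈ dA.keys → ∃ e m u,
    dA.getD t PySem.Dict.empty = pvMkInner e m u ∧
    dB.getD t PySem.Dict.empty = pvMkInner (pvUniqSnd e) m u ∧
    seen.getD t PySem.Set.empty = pvUniqFst e)

-- literal-dict computations (all definitional)
theorem pvInit_eq : pvInit = pvMkInner [] [] [] := rfl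

theorem pvMkInner_modify_exists (e m u : List (List (String × String))) (f : List (List (String × String)) → List (List (String × String))) :
    (pvMkInner e m u).modify "exists" [] f = pvMkInner (f e) m u := rfl

theorem pvMkInner_modify_missing (e m u : List (List (String × String))) (f : List (List (String × String)) → List (List (String × String))) :
    (pvMkInner e m u).modify "missing" [] f = pvMkInner e (f m) u := rfl

theorem pvMkInner_modify_updates (e m u : List (List (String × String))) (f : List (List (String × String)) → List (List (String × String))) :
    (pvMkInner e m u).modify "updates" [] f = pvMkInner e m (f u) := rfl

theorem pvMkInner_getD_exists (e m u : List (List (String × String))) :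
    (pvMkInner e m u).getD "exists" [] = e := rfl

theorem pvMkInner_insert_exists (e m u v : List (List (String × String))) :
    (pvMkInner e m u).insert "exists" v = pvMkInner v m u := rfl

-- one more element through uniq_exists' loop state
theorem pvUniqFst_append (e : List (List (String × String))) (a : List (String × String)) :
    pvUniqFst (e ++ [a]) =
      if (pvUniqFst e).contains (pvKeyOf a) then pvUniqFst e
      else (pvUniqFst e).add (pvKeyOf a) := by
  unfold pvUniqFst
  rw [List.foldl_append]
  simp only [List.foldl_cons, List.foldl_nil, pvUniqStep]
  split <;> rfl

theorem pvUniqSnd_append (e : List (List (String × String))) (a : List (String × String)) :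
    pvUniqSnd (e ++ [a]) =
      if (pvUniqFst e).contains (pvKeyOf a) then pvUniqSnd e
      else pvUniqSnd e ++ [a] := by
  unfold pvUniqSnd pvUniqFst
  rw [List.foldl_append]
  simp only [List.foldl_cons, List.foldl_nil, pvUniqStep]
  split <;> rfl

-- setdefault leaves every getD-at-the-default unchanged
theorem pvSetdefault_getD_self {κ ν : Type} [BEq κ] [LawfulBEq κ] (d : PySem.Dict κ ν) (k : κ) (v : ν) :
    (d.setdefault k v).getD k v = d.getD k v := by
  rw [PySem.Dict.getD_eq_get?_getD, PySem.Dict.get?_setdefault_self, PySem.Dict.getD_eq_get?_getD]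
  rfl

theorem pvSetdefault_getD_ne {κ ν : Type} [BEq κ] [LawfulBEq κ] (d : PySem.Dict κ ν) {k k' : κ} (v d0 : ν)
    (h : k' ≠ k) : (d.setdefault k v).getD k' d0 = d.getD k' d0 := by
  by_cases hc : d.contains k
  · rw [PySem.Dict.setdefault_of_contains d v hc]
  · rw [PySem.Dict.setdefault_of_not_contains d v (by simpa using hc),
      PySem.Dict.getD_insert_of_ne]
    exact h

-- phase 1 of both loops: register the table if it is new
theorem pvInv_phase1 (dA dB : PySem.Dict String (PySem.Dict String (List (List (String × String)))))
    (seen : PySem.Dict String (PySem.Set (Option String × Option String × Option String × Option String × Option String)))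
    (t : String) (h : pvInv dA dB seen) :
    pvInv (if dA.contains t then dA else dA.insert t pvInit) (dB.setdefault t pvInit) seen ∧
      t ∈ (if dA.contains t then dA else dA.insert t pvInit).keys := by
  obtain ⟨hk, hnd, hout, hin⟩ := h
  have hc : dB.contains t = dA.contains t := by
    rw [PySem.Dict.contains_eq_decide_mem_keys, PySem.Dict.contains_eq_decide_mem_keys, hk]
  by_cases hct : dA.contains t
  · rw [if_pos hct, PySem.Dict.setdefault_of_contains dB pvInit (hc.trans (by simp [hct]))]
    exact ⟨⟨hk, hnd, hout, hin⟩, (PySem.Dict.contains_iff_mem_keys dA t).1 hct⟩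
  · have hctf : dA.contains t = false := by simpa using hct
    rw [if_neg hct, PySem.Dict.setdefault_of_not_contains dB pvInit (hc.trans hctf)]
    have htn : t ∉ dA.keys := fun hmem => hct ((PySem.Dict.contains_iff_mem_keys dA t).2 hmem)
    refine ⟨⟨?_, ?_, ?_, ?_⟩, ?_⟩
    · rw [PySem.Dict.keys_insert_of_not_contains dA pvInit hctf,
        PySem.Dict.keys_insert_of_not_contains dB pvInit (hc.trans hctf), hk]
    · exact PySem.Dict.nodup_keys_insert dA t pvInit hnd
    · intro t' ht'
      exact hout t' (fun hm => ht' ((PySem.Dict.mem_keys_insert dA t t' pvInit).2 (Or.inr hm)))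
    · intro t' ht'
      rcases (PySem.Dict.mem_keys_insert dA t t' pvInit).1 ht' with rfl | hm
      · refine ⟨[], [], [], ?_, ?_, ?_⟩
        · rw [PySem.Dict.getD_insert]; simp [pvInit_eq]
        · rw [PySem.Dict.getD_insert]; simp [pvInit_eq]; rfl
        · exact hout t' htn
      · have hne : t' ≠ t := fun he => htn (he ▸ hm)
        obtain ⟨e, m, u, h1, h2, h3⟩ := hin t' hm
        refine ⟨e, m, u, ?_, ?_, h3⟩
        · rw [PySem.Dict.getD_insert, if_neg hne]; exact h1
        · rw [PySem.Dict.getD_insert, if_neg hne]; exact h2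
    · exact (PySem.Dict.mem_keys_insert dA t t pvInit).2 (Or.inl rfl)

-- phase 2, the WOULD_INSERT / WOULD_UPDATE slots: both sides modify the same bucket field
theorem pvInv_slot (d1 bt : PySem.Dict String (PySem.Dict String (List (List (String × String)))))
    (seen : PySem.Dict String (PySem.Set (Option String × Option String × Option String × Option String × Option String)))
    (t : String) (f : PySem.Dict String (List (List (String × String))) → PySem.Dict String (List (List (String × String))))
    (h : pvInv d1 bt seen) (hm : t ∈ d1.keys)
    (hf : ∀ e m u, ∃ m' u', f (pvMkInner e m u) = pvMkInner e m' u' ∧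
        f (pvMkInner (pvUniqSnd e) m u) = pvMkInner (pvUniqSnd e) m' u') :
    pvInv (d1.modify t PySem.Dict.empty f) (bt.modify t PySem.Dict.empty f) seen := by
  obtain ⟨hk, hnd, hout, hin⟩ := h
  have hct : d1.contains t = true := (PySem.Dict.contains_iff_mem_keys d1 t).2 hm
  have hcbt : bt.contains t = true := (PySem.Dict.contains_iff_mem_keys bt t).2 (hk ▸ hm)
  have hkA : (d1.modify t PySem.Dict.empty f).keys = d1.keys := by
    rw [PySem.Dict.keys_modify, PySem.Dict.keys_insert_of_contains _ _ hct]
  have hkB : (bt.modify t PySem.Dict.empty f).keys = bt.keys := by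
    rw [PySem.Dict.keys_modify, PySem.Dict.keys_insert_of_contains _ _ hcbt]
  refine ⟨by rw [hkA, hkB, hk], by rw [hkA]; exact hnd, by rw [hkA]; exact hout, ?_⟩
  intro t' ht'
  rw [hkA] at ht'
  obtain ⟨e, m, u, h1, h2, h3⟩ := hin t' ht'
  by_cases he : t' = t
  · subst he
    obtain ⟨m', u', hf1, hf2⟩ := hf e m u
    exact ⟨e, m', u', by rw [PySem.Dict.getD_modify_self, h1, hf1],
      by rw [PySem.Dict.getD_modify_self, h2, hf2], h3⟩
  · exact ⟨e, m, u, by rw [PySem.Dict.getD_modify_of_ne _ _ _ he]; exact h1,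
      by rw [PySem.Dict.getD_modify_of_ne _ _ _ he]; exact h2, h3⟩

-- phase 2, the EXISTS slot: A appends unconditionally, B dedupes on the fly
theorem pvInv_exists (d1 bt : PySem.Dict String (PySem.Dict String (List (List (String × String)))))
    (seen : PySem.Dict String (PySem.Set (Option String × Option String × Option String × Option String × Option String)))
    (t : String) (a : List (String × String))
    (h : pvInv d1 bt seen) (hm : t ∈ d1.keys) :
    pvInv (d1.modify t PySem.Dict.empty (fun inner => inner.modify "exists" [] (· ++ [a])))
      (if ((seen.setdefault t PySem.Set.empty).getD t PySem.Set.empty).contains (pvKeyOf a)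
        then (bt, seen.setdefault t PySem.Set.empty)
        else (bt.modify t PySem.Dict.empty (fun inner => inner.modify "exists" [] (· ++ [a])),
          (seen.setdefault t PySem.Set.empty).insert t
            (((seen.setdefault t PySem.Set.empty).getD t PySem.Set.empty).add (pvKeyOf a)))).1
      (if ((seen.setdefault t PySem.Set.empty).getD t PySem.Set.empty).contains (pvKeyOf a)
        then (bt, seen.setdefault t PySem.Set.empty)
        else (bt.modify t PySem.Dict.empty (fun inner => inner.modify "exists" [] (· ++ [a])),
          (seen.setdefault t PySem.Set.empty).insert t
            (((seen.setdefault t PySem.Set.empty).getD t PySem.Set.empty).add (pvKeyOf a)))).2 := by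
  obtain ⟨hk, hnd, hout, hin⟩ := h
  obtain ⟨e, m, u, h1, h2, h3⟩ := hin t hm
  have hct : d1.contains t = true := (PySem.Dict.contains_iff_mem_keys d1 t).2 hm
  have hkA : (d1.modify t PySem.Dict.empty (fun inner => inner.modify "exists" [] (· ++ [a]))).keys = d1.keys := by
    rw [PySem.Dict.keys_modify, PySem.Dict.keys_insert_of_contains _ _ hct]
  have hsd : (seen.setdefault t PySem.Set.empty).getD t PySem.Set.empty = pvUniqFst e := by
    rw [pvSetdefault_getD_self, h3]
  have hA : (d1.modify t PySem.Dict.empty (fun inner => inner.modify "exists" [] (· ++ [a]))).getD t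
      PySem.Dict.empty = pvMkInner (e ++ [a]) m u := by
    rw [PySem.Dict.getD_modify_self, h1, pvMkInner_modify_exists]
  have hAne : ∀ t', t' ≠ t →
      (d1.modify t PySem.Dict.empty (fun inner => inner.modify "exists" [] (· ++ [a]))).getD t'
        PySem.Dict.empty = d1.getD t' PySem.Dict.empty := fun t' ht' =>
    PySem.Dict.getD_modify_of_ne _ _ _ ht'
  have hsne : ∀ t', t' ≠ t →
      (seen.setdefault t PySem.Set.empty).getD t' PySem.Set.empty = seen.getD t' PySem.Set.empty :=
    fun t' ht' => pvSetdefault_getD_ne seen _ _ ht'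
  rw [hsd]
  by_cases hkey : (pvUniqFst e).contains (pvKeyOf a)
  · rw [if_pos hkey]
    dsimp only
    refine ⟨by rw [hkA, hk], by rw [hkA]; exact hnd, ?_, ?_⟩
    · intro t' ht'
      rw [hkA] at ht'
      rw [hsne t' (fun he => ht' (he ▸ hm))]
      exact hout t' ht'
    · intro t' ht'
      rw [hkA] at ht'
      by_cases he : t' = t
      · subst he
        refine ⟨e ++ [a], m, u, hA, ?_, ?_⟩
        · rw [h2, pvUniqSnd_append, if_pos hkey]
        · rw [hsd, pvUniqFst_append, if_pos hkey]
      · obtain ⟨e', m', u', g1, g2, g3⟩ := hin t' ht'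
        exact ⟨e', m', u', by rw [hAne t' he]; exact g1, g2, by rw [hsne t' he]; exact g3⟩
  · rw [if_neg hkey]
    dsimp only
    have hcbt : bt.contains t = true := (PySem.Dict.contains_iff_mem_keys bt t).2 (hk ▸ hm)
    have hkB : (bt.modify t PySem.Dict.empty (fun inner => inner.modify "exists" [] (· ++ [a]))).keys = bt.keys := by
      rw [PySem.Dict.keys_modify, PySem.Dict.keys_insert_of_contains _ _ hcbt]
    refine ⟨by rw [hkA, hkB, hk], by rw [hkA]; exact hnd, ?_, ?_⟩
    · intro t' ht'
      rw [hkA] at ht'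
      have he : t' ≠ t := fun he => ht' (he ▸ hm)
      rw [PySem.Dict.getD_insert_of_ne _ _ _ he, hsne t' he]
      exact hout t' ht'
    · intro t' ht'
      rw [hkA] at ht'
      by_cases he : t' = t
      · subst he
        refine ⟨e ++ [a], m, u, hA, ?_, ?_⟩
        · rw [PySem.Dict.getD_modify_self, h2, pvMkInner_modify_exists, pvUniqSnd_append,
            if_neg hkey]
        · rw [PySem.Dict.getD_insert_self, pvUniqFst_append, if_neg hkey]
      · obtain ⟨e', m', u', g1, g2, g3⟩ := hin t' ht'
        refine ⟨e', m', u', by rw [hAne t' he]; exact g1,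
          by rw [PySem.Dict.getD_modify_of_ne _ _ _ he]; exact g2,
          by rw [PySem.Dict.getD_insert_of_ne _ _ _ he, hsne t' he]; exact g3⟩

theorem pvInv_step (dA dB : PySem.Dict String (PySem.Dict String (List (List (String × String)))))
    (seen : PySem.Dict String (PySem.Set (Option String × Option String × Option String × Option String × Option String)))
    (a : List (String × String)) (h : pvInv dA dB seen) :
    pvInv (pvStepA dA a) (pvStepB (dB, seen) a).1 (pvStepB (dB, seen) a).2 := by
  unfold pvStepA pvStepB
  cases hT : pvGetS a "table" with
  | none => exact h
  | some t =>
    by_cases ht0 : t = ""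
    · simp only [if_pos ht0]; exact h
    · simp only [if_neg ht0]
      obtain ⟨h1, hmem⟩ := pvInv_phase1 dA dB seen t h
      by_cases hE : pvGetS a "action" = some "EXISTS"
      · simp only [if_pos hE]
        exact pvInv_exists _ _ _ t a h1 hmem
      · by_cases hI : pvGetS a "action" = some "WOULD_INSERT"
        · simp only [if_neg hE, if_pos hI]
          exact pvInv_slot _ _ _ t _ h1 hmem (fun e m u =>
            ⟨m ++ [a], u, pvMkInner_modify_missing e m u _, pvMkInner_modify_missing _ m u _⟩)
        · by_cases hU : pvGetS a "action" = some "WOULD_UPDATE"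
          · simp only [if_neg hE, if_neg hI, if_pos hU]
            exact pvInv_slot _ _ _ t _ h1 hmem (fun e m u =>
              ⟨m, u ++ [a], pvMkInner_modify_updates e m u _, pvMkInner_modify_updates _ m u _⟩)
          · simp only [if_neg hE, if_neg hI, if_neg hU]
            exact h1

theorem pvInv_foldl (acts : List (List (String × String)))
    (dA dB : PySem.Dict String (PySem.Dict String (List (List (String × String)))))
    (seen : PySem.Dict String (PySem.Set (Option String × Option String × Option String × Option String × Option String)))
    (h : pvInv dA dB seen) :
    pvInv (acts.foldl pvStepA dA) (acts.foldl pvStepB (dB, seen)).1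
      (acts.foldl pvStepB (dB, seen)).2 := by
  induction acts generalizing dA dB seen with
  | nil => exact h
  | cons a rest ih =>
    simpa using ih _ _ _ (pvInv_step dA dB seen a h)

-- ===== VERDICT (by name: the statement is the Claim_ definition above) =====
theorem summarize_db_plan_spec : Claim_equal_summarize_db_plan := by
  intro actions _
  unfold Spec_summarize_db_plan summarize_db_plan summarize_db_plan_alt
  have h0 : pvInv PySem.Dict.empty PySem.Dict.empty PySem.Dict.empty :=
    ⟨rfl, by simp [PySem.Dict.keys_empty], fun t _ => PySem.Dict.getD_empty t _,
      fun t ht => by simp [PySem.Dict.keys_empty] at ht⟩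
  obtain ⟨hk, hnd, _, hin⟩ := pvInv_foldl actions PySem.Dict.empty PySem.Dict.empty PySem.Dict.empty h0
  set dA := actions.foldl pvStepA PySem.Dict.empty with hdA
  set dB := (actions.foldl pvStepB (PySem.Dict.empty, PySem.Dict.empty)).1 with hdB
  show dA.items.map (fun p => (p.1, (p.2.insert "exists" (pvUniqExists (p.2.getD "exists" []))).items)) = dB.items.map (fun p => (p.1, p.2.items))
  rw [PySem.Dict.items_eq_map_keys dA hnd PySem.Dict.empty,
    PySem.Dict.items_eq_map_keys dB (hk ▸ hnd) PySem.Dict.empty, hk,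
    List.map_map, List.map_map]
  refine List.map_congr_left ?_
  intro t ht
  obtain ⟨e, m, u, h1, h2, _⟩ := hin t ht
  simp only [Function.comp_apply, h1, h2, pvMkInner_getD_exists]
  have : pvUniqExists e = pvUniqSnd e := rfl
  rw [this, pvMkInner_insert_exists]
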